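-- pv_equiv track=rewrite | github.com/f4w4z/InboxPilot | inference.py | get_fallback_action
-- ===== SOURCE A (Python) =====
-- def get_fallback_action(task_id, obs):
--     """Deterministic fallback to ensure evaluation doesn't get stuck."""
--     inbox = obs.get("inbox", [])
--     if not inbox:
--         return {"action_type": "finish"}
--
--     prev = obs.get("previous_actions", [])
--     email_id = inbox[0]["id"]
--
--     if task_id == "easy":
--         return {"action_type": "classify", "email_id": email_id, "label": "spam"}
--
--     elif task_id == "medium":
--         classified = any(
--             a.get("action_type") == "classify" and a.get("email_id") == email_id
--             for a in prev
--         )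
--         replied = any(
--             a.get("action_type") == "reply" and a.get("email_id") == email_id
--             for a in prev
--         )
--         if not classified:
--             return {"action_type": "classify", "email_id": email_id, "label": "support"}
--         if not replied:
--             return {
--                 "action_type": "reply",
--                 "email_id": email_id,
--                 "reply_text": "Working on fixing your account.",
--             }
--         return {"action_type": "finish"}
--
--     elif task_id == "hard":
--         urgent = [
--             e
--             for e in inbox
--             if "urgent" in e.get("subject", "").lower()
--             or "report" in e.get("subject", "").lower()
--         ]
--         target = urgent[0]["id"] if urgent else email_id
--
--         prioritized = any(
--             a.get("action_type") == "prioritize" and a.get("email_id") == target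
--             for a in prev
--         )
--         if not prioritized:
--             return {"action_type": "prioritize", "email_id": target, "priority": "high"}
--
--         classified = any(
--             a.get("action_type") == "classify" and a.get("email_id") == target
--             for a in prev
--         )
--         if not classified:
--             return {"action_type": "classify", "email_id": target, "label": "urgent"}
--
--         replied = any(
--             a.get("action_type") == "reply" and a.get("email_id") == target
--             for a in prev
--         )
--         if not replied:
--             return {
--                 "action_type": "reply",
--                 "email_id": target,
--                 "reply_text": "I will send it today.",
--             }
--
--         return {"action_type": "finish"}
--
--     return {"action_type": "finish"}
-- ===== SOURCE B (Python) =====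
-- def get_fallback_action(task_id, obs):
--     """Deterministic fallback: progress bitmask + trailing-ones count picks the step."""
--     inbox = obs.get("inbox", [])
--     if not inbox:
--         return {"action_type": "finish"}
--
--     email_id = inbox[0]["id"]
--
--     if task_id == "easy":
--         return {"action_type": "classify", "email_id": email_id, "label": "spam"}
--
--     if task_id == "medium":
--         target = email_id
--         weight = {"classify": 1, "reply": 2}
--     elif task_id == "hard":
--         target = email_id
--         for e in inbox:
--             s = e.get("subject", "").lower()
--             if "urgent" in s or "report" in s:
--                 target = e["id"]
--                 break
--         weight = {"prioritize": 1, "classify": 2, "reply": 4}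
--     else:
--         return {"action_type": "finish"}
--
--     mask = 0
--     for a in obs.get("previous_actions", []):
--         if a.get("email_id") == target:
--             mask |= weight.get(a.get("action_type"), 0)
--
--     # k = index of the first pending step = number of trailing one-bits of mask
--     k = 0
--     while mask & 1:
--         mask >>= 1
--         k += 1
--     return _step(task_id, target, k)
--
--
-- def _step(task_id, target, k):
--     if task_id == "medium":
--         if k == 0:
--             return {"action_type": "classify", "email_id": target, "label": "support"}
--         if k == 1:
--             return {"action_type": "reply", "email_id": target,
--                     "reply_text": "Working on fixing your account."}
--     else:
--         if k == 0:
--             return {"action_type": "prioritize", "email_id": target, "priority": "high"}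
--         if k == 1:
--             return {"action_type": "classify", "email_id": target, "label": "urgent"}
--         if k == 2:
--             return {"action_type": "reply", "email_id": target,
--                     "reply_text": "I will send it today."}
--     return {"action_type": "finish"}
-- ===== Notes on version B (the rewrite author's own statement) =====
-- stated objective: alternative
-- what changed: Replaces the per-step any()-scans and if-not chains by a single fold over previous_actions accumulating a progress bitmask (weight dict per difficulty), then counts the mask's trailing one-bits to index the pending step; the hard target comes from a break-loop over the inbox instead of building the urgent list.
import Mathlib
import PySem

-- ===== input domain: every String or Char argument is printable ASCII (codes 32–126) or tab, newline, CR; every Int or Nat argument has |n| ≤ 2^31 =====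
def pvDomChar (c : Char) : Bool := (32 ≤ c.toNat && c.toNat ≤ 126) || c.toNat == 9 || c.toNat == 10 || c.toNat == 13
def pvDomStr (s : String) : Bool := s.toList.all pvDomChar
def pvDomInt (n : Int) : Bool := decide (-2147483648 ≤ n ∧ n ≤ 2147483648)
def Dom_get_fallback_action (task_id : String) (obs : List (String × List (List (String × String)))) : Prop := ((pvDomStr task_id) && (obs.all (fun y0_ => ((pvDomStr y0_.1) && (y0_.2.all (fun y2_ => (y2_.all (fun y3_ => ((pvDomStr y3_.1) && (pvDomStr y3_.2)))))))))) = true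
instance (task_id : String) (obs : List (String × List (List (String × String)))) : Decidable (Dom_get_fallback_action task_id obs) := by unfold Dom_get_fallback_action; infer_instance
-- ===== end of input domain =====

-- B replaces A's unrolled any()-scans and if-not chains with a progress bitmask folded
-- over previous_actions and a trailing-ones count selecting the step (objective: alternative).

-- dict.get k (first match in the association list; Python dicts have unique keys)
def alistGet? {α : Type} (d : List (String × α)) (k : String) : Option α :=
  (d.find? (fun p => p.1 == k)).map Prod.snd

-- "urgent" in subject.lower() or "report" in subject.lower() (subject defaulting to "")
def pvUrgentPred (e : List (String × String)) : Bool :=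
  PySem.Str.isIn "urgent" (PySem.Str.lower ((alistGet? e "subject").getD "")) ||
  PySem.Str.isIn "report" (PySem.Str.lower ((alistGet? e "subject").getD ""))

-- ===== PORT A =====
def get_fallback_action (task_id : String) (obs : List (String × List (List (String × String)))) : List (String × String) :=
  let inbox := (alistGet? obs "inbox").getD []
  if inbox.isEmpty then [("action_type", "finish")]
  else
    let prev := (alistGet? obs "previous_actions").getD []
    -- inbox[0]["id"]: KeyError (excluded by Pre_) modelled by the "" default
    let email_id := (alistGet? inbox.headI "id").getD ""
    if task_id = "easy" then
      [("action_type", "classify"), ("email_id", email_id), ("label", "spam")]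
    else if task_id = "medium" then
      let classified := prev.any (fun a =>
        (alistGet? a "action_type" == some "classify") && (alistGet? a "email_id" == some email_id))
      let replied := prev.any (fun a =>
        (alistGet? a "action_type" == some "reply") && (alistGet? a "email_id" == some email_id))
      if !classified then
        [("action_type", "classify"), ("email_id", email_id), ("label", "support")]
      else if !replied then
        [("action_type", "reply"), ("email_id", email_id), ("reply_text", "Working on fixing your account.")]
      else [("action_type", "finish")]
    else if task_id = "hard" then
      let urgent := inbox.filter pvUrgentPred
      -- urgent[0]["id"]: KeyError (excluded by Pre_) modelled by the "" default
      let target := if urgent.isEmpty then email_id else (alistGet? urgent.headI "id").getD ""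
      let prioritized := prev.any (fun a =>
        (alistGet? a "action_type" == some "prioritize") && (alistGet? a "email_id" == some target))
      if !prioritized then
        [("action_type", "prioritize"), ("email_id", target), ("priority", "high")]
      else
        let classified := prev.any (fun a =>
          (alistGet? a "action_type" == some "classify") && (alistGet? a "email_id" == some target))
        if !classified then
          [("action_type", "classify"), ("email_id", target), ("label", "urgent")]
        else
          let replied := prev.any (fun a =>
            (alistGet? a "action_type" == some "reply") && (alistGet? a "email_id" == some target))
          if !replied then
            [("action_type", "reply"), ("email_id", target), ("reply_text", "I will send it today.")]
          else [("action_type", "finish")]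
    else [("action_type", "finish")]

-- ===== PORT B =====
-- weight dicts: {"classify":1,"reply":2} and {"prioritize":1,"classify":2,"reply":4}, .get default 0
def pvWeightM (t : Option String) : Nat :=
  if t == some "classify" then 1 else if t == some "reply" then 2 else 0

def pvWeightH (t : Option String) : Nat :=
  if t == some "prioritize" then 1 else if t == some "classify" then 2
  else if t == some "reply" then 4 else 0

-- for e in inbox: if urgent-pred: target = e["id"]; break   (e["id"] KeyError modelled by "")
def pvFindTarget : List (List (String × String)) → String → String
  | [], d => d
  | e :: rest, d => if pvUrgentPred e then (alistGet? e "id").getD "" else pvFindTarget rest d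

-- mask = 0; for a in prev: if a.get("email_id")==target: mask |= weight.get(a.get("action_type"),0)
def pvMask (w : Option String → Nat) (target : String) (prev : List (List (String × String))) : Nat :=
  prev.foldl (fun m a =>
    if alistGet? a "email_id" == some target then m ||| w (alistGet? a "action_type") else m) 0

-- k = 0; while mask & 1: mask >>= 1; k += 1
def pvTrailOnes (m : Nat) : Nat :=
  if h : m &&& 1 = 1 then pvTrailOnes (m >>> 1) + 1 else 0
  termination_by m
  decreasing_by
    have hm : m % 2 = 1 := by simpa [Nat.and_one_is_mod] using h
    simp only [Nat.shiftRight_eq_div_pow, pow_one]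
    omega

-- _step(task_id, target, k)
def pvStep (task_id target : String) (k : Nat) : List (String × String) :=
  if task_id = "medium" then
    if k = 0 then [("action_type", "classify"), ("email_id", target), ("label", "support")]
    else if k = 1 then [("action_type", "reply"), ("email_id", target), ("reply_text", "Working on fixing your account.")]
    else [("action_type", "finish")]
  else
    if k = 0 then [("action_type", "prioritize"), ("email_id", target), ("priority", "high")]
    else if k = 1 then [("action_type", "classify"), ("email_id", target), ("label", "urgent")]
    else if k = 2 then [("action_type", "reply"), ("email_id", target), ("reply_text", "I will send it today.")]
    else [("action_type", "finish")]

def get_fallback_action_alt (task_id : String) (obs : List (String × List (List (String × String)))) : List (String × String) :=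
  let inbox := (alistGet? obs "inbox").getD []
  if inbox.isEmpty then [("action_type", "finish")]
  else
    let email_id := (alistGet? inbox.headI "id").getD ""
    if task_id = "easy" then
      [("action_type", "classify"), ("email_id", email_id), ("label", "spam")]
    else if task_id = "medium" then
      let prev := (alistGet? obs "previous_actions").getD []
      pvStep "medium" email_id (pvTrailOnes (pvMask pvWeightM email_id prev))
    else if task_id = "hard" then
      let target := pvFindTarget inbox email_id
      let prev := (alistGet? obs "previous_actions").getD []
      pvStep "hard" target (pvTrailOnes (pvMask pvWeightH target prev))
    else [("action_type", "finish")]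

-- ===== PRECONDITION & SPEC =====
-- Pre_ excludes exactly the inputs where A raises KeyError (B raises there too): a non-empty
-- inbox whose first email lacks "id", or (task "hard") a first urgent-matching email lacking "id".
def Pre_get_fallback_action (task_id : String) (obs : List (String × List (List (String × String)))) : Prop :=
  let inbox := (alistGet? obs "inbox").getD []
  inbox ≠ [] →
    ((alistGet? inbox.headI "id").isSome = true ∧
     (task_id = "hard" →
       ∀ e, (inbox.filter pvUrgentPred).head? = some e → (alistGet? e "id").isSome = true))
instance (task_id : String) (obs : List (String × List (List (String × String)))) : Decidable (Pre_get_fallback_action task_id obs) := by unfold Pre_get_fallback_action; infer_instance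

def pvWitness_get_fallback_action : String × (List (String × List (List (String × String)))) :=
  ("hard", [("inbox", [[("id", "1"), ("subject", "weekly Report")], [("subject", "urgent")]]),
            ("previous_actions", [[("action_type", "prioritize"), ("email_id", "1")]])])

def Spec_get_fallback_action (task_id : String) (obs : List (String × List (List (String × String)))) (out : List (String × String)) : Prop := out = get_fallback_action_alt task_id obs
instance (task_id : String) (obs : List (String × List (List (String × String)))) (out : List (String × String)) : Decidable (Spec_get_fallback_action task_id obs out) := by unfold Spec_get_fallback_action; infer_instance

-- ===== CLAIM (what is proved, stated in full; the proofs are below) =====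
def Claim_equal_get_fallback_action : Prop := ∀ (task_id : String) (obs : List (String × List (List (String × String)))), Dom_get_fallback_action task_id obs → Pre_get_fallback_action task_id obs → Spec_get_fallback_action task_id obs (get_fallback_action task_id obs)

-- ===== LEMMAS AND PROOFS =====

-- pulling the foldl's initial mask out as a bitwise or
theorem pvMask_shift (w : Option String → Nat) (t : String)
    (prev : List (List (String × String))) (m : Nat) :
    prev.foldl (fun m a =>
      if alistGet? a "email_id" == some t then m ||| w (alistGet? a "action_type") else m) m
    = m ||| pvMask w t prev := by
  induction prev generalizing m with
  | nil => simp [pvMask]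
  | cons a rest ih =>
    have hcons : pvMask w t (a :: rest) =
        (if alistGet? a "email_id" == some t then (0 : Nat) ||| w (alistGet? a "action_type") else 0) |||
          pvMask w t rest := by
      show List.foldl _ (0 : Nat) (a :: rest) = _
      rw [List.foldl_cons, ih]
    rw [List.foldl_cons, ih, hcons]
    by_cases h : alistGet? a "email_id" == some t
    · simp [h, Nat.or_assoc]
    · simp [h]

theorem pvMask_medium (t : String) (prev : List (List (String × String))) :
    pvMask pvWeightM t prev =
      (if prev.any (fun a => (alistGet? a "action_type" == some "classify") && (alistGet? a "email_id" == some t)) then 1 else 0) |||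
      (if prev.any (fun a => (alistGet? a "action_type" == some "reply") && (alistGet? a "email_id" == some t)) then 2 else 0) := by
  induction prev with
  | nil => simp [pvMask]
  | cons a rest ih =>
    have hcons : pvMask pvWeightM t (a :: rest) =
        (if alistGet? a "email_id" == some t then (0 : Nat) ||| pvWeightM (alistGet? a "action_type") else 0) |||
          pvMask pvWeightM t rest := by
      show List.foldl _ (0 : Nat) (a :: rest) = _
      rw [List.foldl_cons, pvMask_shift]
    rw [hcons, ih]
    simp only [List.any_cons]
    by_cases he : alistGet? a "email_id" == some t <;>
      by_cases hc : alistGet? a "action_type" == some "classify" <;>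
        by_cases hr : alistGet? a "action_type" == some "reply" <;>
          simp only [he, hc, hr, pvWeightM, if_true, Bool.false_eq_true, if_false,
            Bool.and_true, Bool.and_false, Bool.true_or,
            Bool.false_or, Nat.zero_or] <;>
          split_ifs <;> simp_all

theorem pvMask_hard (t : String) (prev : List (List (String × String))) :
    pvMask pvWeightH t prev =
      (if prev.any (fun a => (alistGet? a "action_type" == some "prioritize") && (alistGet? a "email_id" == some t)) then 1 else 0) |||
      (if prev.any (fun a => (alistGet? a "action_type" == some "classify") && (alistGet? a "email_id" == some t)) then 2 else 0) |||
      (if prev.any (fun a => (alistGet? a "action_type" == some "reply") && (alistGet? a "email_id" == some t)) then 4 else 0) := by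
  induction prev with
  | nil => simp [pvMask]
  | cons a rest ih =>
    have hcons : pvMask pvWeightH t (a :: rest) =
        (if alistGet? a "email_id" == some t then (0 : Nat) ||| pvWeightH (alistGet? a "action_type") else 0) |||
          pvMask pvWeightH t rest := by
      show List.foldl _ (0 : Nat) (a :: rest) = _
      rw [List.foldl_cons, pvMask_shift]
    rw [hcons, ih]
    simp only [List.any_cons]
    by_cases he : alistGet? a "email_id" == some t <;>
      by_cases hp : alistGet? a "action_type" == some "prioritize" <;>
        by_cases hc : alistGet? a "action_type" == some "classify" <;>
          by_cases hr : alistGet? a "action_type" == some "reply" <;>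
            simp only [he, hp, hc, hr, pvWeightH, if_true, Bool.false_eq_true, if_false,
              Bool.and_true, Bool.and_false, Bool.true_or,
              Bool.false_or, Nat.zero_or] <;>
            split_ifs <;> simp_all

-- B's break-loop over the inbox equals A's filter-then-head urgent target.
theorem pvFindTarget_eq (inbox : List (List (String × String))) (email_id : String) :
    pvFindTarget inbox email_id
    = (if (inbox.filter pvUrgentPred).isEmpty then email_id
       else (alistGet? (inbox.filter pvUrgentPred).headI "id").getD "") := by
  induction inbox with
  | nil => simp [pvFindTarget]
  | cons e rest ih =>
    by_cases h : pvUrgentPred e = true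
    · simp [pvFindTarget, h, List.headI]
    · simp only [Bool.not_eq_true] at h
      simp [pvFindTarget, h, ih]

theorem pvTrailOnes_val : pvTrailOnes 0 = 0 ∧ pvTrailOnes 1 = 1 ∧ pvTrailOnes 2 = 0 ∧
    pvTrailOnes 3 = 2 ∧ pvTrailOnes 4 = 0 ∧ pvTrailOnes 5 = 1 ∧ pvTrailOnes 6 = 0 ∧
    pvTrailOnes 7 = 3 := by
  refine ⟨?_, ?_, ?_, ?_, ?_, ?_, ?_, ?_⟩ <;> simp [pvTrailOnes]

-- ===== VERDICT (by name: the statement is the Claim_ definition above) =====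
theorem get_fallback_action_spec : Claim_equal_get_fallback_action := by
  unfold Claim_equal_get_fallback_action
  intro task_id obs _dom _pre
  unfold Spec_get_fallback_action get_fallback_action get_fallback_action_alt
  by_cases hE : ((alistGet? obs "inbox").getD []).isEmpty
  · simp [hE]
  · simp only [hE, Bool.false_eq_true, if_false]
    by_cases h1 : task_id = "easy"
    · simp [h1]
    · by_cases h2 : task_id = "medium"
      · simp only [h2, if_true]
        rw [pvMask_medium]
        by_cases hc : (((alistGet? obs "previous_actions").getD []).any (fun a =>
            (alistGet? a "action_type" == some "classify") &&
            (alistGet? a "email_id" == some ((alistGet? ((alistGet? obs "inbox").getD []).headI "id").getD "")))) = true <;>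
          by_cases hr : (((alistGet? obs "previous_actions").getD []).any (fun a =>
            (alistGet? a "action_type" == some "reply") &&
            (alistGet? a "email_id" == some ((alistGet? ((alistGet? obs "inbox").getD []).headI "id").getD "")))) = true <;>
          simp [hc, hr, pvStep, pvTrailOnes_val.1, pvTrailOnes_val.2.1, pvTrailOnes_val.2.2.1,
            pvTrailOnes_val.2.2.2.1]
      · by_cases h3 : task_id = "hard"
        · subst h3
          simp only [if_neg h1, if_neg h2, if_true]
          rw [pvFindTarget_eq, pvMask_hard]
          set t := (if (((alistGet? obs "inbox").getD []).filter pvUrgentPred).isEmpty then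
              (alistGet? ((alistGet? obs "inbox").getD []).headI "id").getD ""
            else (alistGet? ((((alistGet? obs "inbox").getD []).filter pvUrgentPred)).headI "id").getD "") with ht
          by_cases hp : (((alistGet? obs "previous_actions").getD []).any (fun a =>
              (alistGet? a "action_type" == some "prioritize") && (alistGet? a "email_id" == some t))) = true <;>
            by_cases hc : (((alistGet? obs "previous_actions").getD []).any (fun a =>
              (alistGet? a "action_type" == some "classify") && (alistGet? a "email_id" == some t))) = true <;>
            by_cases hr : (((alistGet? obs "previous_actions").getD []).any (fun a =>
              (alistGet? a "action_type" == some "reply") && (alistGet? a "email_id" == some t))) = true <;>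
            simp [hp, hc, hr, pvStep, pvTrailOnes_val.1, pvTrailOnes_val.2.1, pvTrailOnes_val.2.2.1,
              pvTrailOnes_val.2.2.2.1, pvTrailOnes_val.2.2.2.2.1, pvTrailOnes_val.2.2.2.2.2.1,
              pvTrailOnes_val.2.2.2.2.2.2.1, pvTrailOnes_val.2.2.2.2.2.2.2]
        · simp [h1, h2, h3]
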